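-- pv_equiv track=rewrite | github.com/ShowyHe/Nav2-demo | scripts/eval_v2_action_recovery.py | count_recovery_hits
-- ===== SOURCE A (Python) =====
-- from typing import List, Tuple, Set
--
-- def count_recovery_hits(lines: List[str], keywords: List[str]) -> Tuple[str, str, int]:
--     hits = []
--     total = 0
--     for ln in lines:
--         for kw in keywords:
--             if kw in ln:
--                 total += 1
--                 hits.append(kw)
--
--     uniq = []
--     seen: Set[str] = set()
--     for x in hits:
--         if x not in seen:
--             uniq.append(x)
--             seen.add(x)
--
--     recovery = "Y" if total > 0 else "N"
--     return recovery, ";".join(uniq), total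
-- ===== SOURCE B (Python) =====
-- def count_recovery_hits(lines, keywords):
--     total = 0
--     for kw in keywords:
--         for ln in lines:
--             if kw in ln:
--                 total += 1
--     uniq = []
--     pending = list(dict.fromkeys(keywords))
--     for ln in lines:
--         found = [kw for kw in pending if kw in ln]
--         uniq.extend(found)
--         pending = [kw for kw in pending if kw not in found]
--     recovery = "Y" if total > 0 else "N"
--     return recovery, ";".join(uniq), total
-- ===== Notes on version B (the rewrite author's own statement) =====
-- stated objective: alternative
-- what changed: B swaps the loop nesting to keyword-major for the total and replaces A's hits-list-then-dedup second phase by a single line-major pass that moves matched keywords out of a shrinking deduplicated pending pool, never materialising the hits list or a seen set.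
import Mathlib
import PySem

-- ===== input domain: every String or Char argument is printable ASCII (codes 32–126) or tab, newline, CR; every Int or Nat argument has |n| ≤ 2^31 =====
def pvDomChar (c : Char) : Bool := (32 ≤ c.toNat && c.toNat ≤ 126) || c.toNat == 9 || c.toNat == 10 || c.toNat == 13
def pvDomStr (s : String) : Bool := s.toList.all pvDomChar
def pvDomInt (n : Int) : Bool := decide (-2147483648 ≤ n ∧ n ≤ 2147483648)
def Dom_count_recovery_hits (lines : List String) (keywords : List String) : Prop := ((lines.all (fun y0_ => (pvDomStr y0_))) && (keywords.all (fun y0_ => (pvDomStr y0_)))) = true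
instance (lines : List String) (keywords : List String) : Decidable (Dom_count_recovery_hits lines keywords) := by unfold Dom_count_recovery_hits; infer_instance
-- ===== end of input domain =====

-- B swaps the loop nesting to keyword-major for the total and replaces A's hits-list-then-dedup
-- second phase by one pass over a shrinking deduplicated pending pool (objective: alternative).

-- ===== PORT A =====
def count_recovery_hits (lines : List String) (keywords : List String) : String × String × Int :=
  -- hits/total loop, then the seen-set dedup loop, as in A
  let st := lines.foldl (fun (st : List String × Int) ln =>
      keywords.foldl (fun (st : List String × Int) kw =>
        if PySem.Str.isIn kw ln then (st.1 ++ [kw], st.2 + 1) else st) st) ([], 0)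
  let us := st.1.foldl (fun (us : List String × PySem.Set String) x =>
      if PySem.Set.contains us.2 x then us else (us.1 ++ [x], PySem.Set.add us.2 x))
      ([], PySem.Set.empty)
  let recovery := if st.2 > 0 then "Y" else "N"
  (recovery, PySem.Str.join ";" us.1, st.2)

-- ===== PORT B =====
def count_recovery_hits_alt (lines : List String) (keywords : List String) : String × String × Int :=
  let total := keywords.foldl (fun t kw =>
      lines.foldl (fun t ln => if PySem.Str.isIn kw ln then t + 1 else t) t) (0 : Int)
  -- pending := list(dict.fromkeys(keywords)); per line move matched keywords from pending to uniq
  let up := lines.foldl (fun (up : List String × List String) ln =>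
      let found := up.2.filter (fun kw => PySem.Str.isIn kw ln)
      (up.1 ++ found, up.2.filter (fun kw => !found.contains kw))) ([], PySem.List.dedup keywords)
  let recovery := if total > 0 then "Y" else "N"
  (recovery, PySem.Str.join ";" up.1, total)

-- ===== PRECONDITION & SPEC =====
def Spec_count_recovery_hits (lines : List String) (keywords : List String) (out : String × String × Int) : Prop := out = count_recovery_hits_alt lines keywords
instance (lines : List String) (keywords : List String) (out : String × String × Int) : Decidable (Spec_count_recovery_hits lines keywords out) := by unfold Spec_count_recovery_hits; infer_instance

-- ===== CLAIM (what is proved, stated in full; the proofs are below) =====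
def Claim_equal_count_recovery_hits : Prop := ∀ (lines : List String) (keywords : List String), Dom_count_recovery_hits lines keywords → Spec_count_recovery_hits lines keywords (count_recovery_hits lines keywords)

-- ===== LEMMAS AND PROOFS =====

-- the substring test both programs share
def pvC (ln kw : String) : Bool := PySem.Str.isIn kw ln

-- first-occurrence dedup relative to an already-seen list (model of A's second loop)
def pvDed (seen : List String) : List String → List String
  | [] => []
  | x :: xs => if x ∈ seen then pvDed seen xs else x :: pvDed (seen ++ [x]) xs

-- model of B's pending-pool pass
def pvU : List String → List String → List String
  | [], _ => []
  | ln :: ls, p =>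
    let found := p.filter (fun kw => pvC ln kw)
    found ++ pvU ls (p.filter (fun kw => !found.contains kw))

-- A's inner keyword loop appends the matching keywords and counts them
theorem pvA_inner (ln : String) (kws : List String) (h : List String) (t : Int) :
    kws.foldl (fun (st : List String × Int) kw =>
        if PySem.Str.isIn kw ln then (st.1 ++ [kw], st.2 + 1) else st) (h, t)
      = (h ++ kws.filter (pvC ln), t + (kws.countP (pvC ln) : Int)) := by
  induction kws generalizing h t with
  | nil => simp
  | cons kw kws ih =>
    rw [List.foldl_cons]
    by_cases hc : pvC ln kw
    · rw [if_pos (show PySem.Str.isIn kw ln = true from hc), ih,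
          List.filter_cons_of_pos hc, List.countP_cons_of_pos hc]
      simp only [Prod.mk.injEq]
      exact ⟨by simp, by push_cast; ring⟩
    · rw [if_neg (show ¬ PySem.Str.isIn kw ln = true from hc), ih,
          List.filter_cons_of_neg hc, List.countP_cons_of_neg hc]

-- A's first phase: hits is the flatMap of per-line matches, total its count
theorem pvA_outer (lines kws : List String) (h : List String) (t : Int) :
    lines.foldl (fun (st : List String × Int) ln =>
        kws.foldl (fun (st : List String × Int) kw =>
          if PySem.Str.isIn kw ln then (st.1 ++ [kw], st.2 + 1) else st) st) (h, t)
      = (h ++ lines.flatMap (fun ln => kws.filter (pvC ln)),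
         t + (lines.map (fun ln => (kws.countP (pvC ln) : Int))).sum) := by
  induction lines generalizing h t with
  | nil => simp
  | cons ln ls ih =>
    simp only [List.foldl_cons, pvA_inner, ih, List.flatMap_cons, List.map_cons, List.sum_cons]
    simp only [Prod.mk.injEq]
    exact ⟨by simp, by ring⟩

-- A's second phase is pvDed
theorem pvA2 (l : List String) (u : List String) (s : PySem.Set String) :
    (l.foldl (fun (us : List String × PySem.Set String) x =>
        if PySem.Set.contains us.2 x then us else (us.1 ++ [x], PySem.Set.add us.2 x)) (u, s)).1
      = u ++ pvDed s l := by
  induction l generalizing u s with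
  | nil => simp [pvDed]
  | cons x xs ih =>
    rw [List.foldl_cons]
    by_cases hx : x ∈ s
    · rw [if_pos (show PySem.Set.contains s x = true from (PySem.Set.contains_iff s x).mpr hx)]
      simp only [pvDed, if_pos hx]
      exact ih u s
    · have hc : ¬ PySem.Set.contains s x = true := fun h => hx ((PySem.Set.contains_iff s x).mp h)
      rw [if_neg hc]
      simp only [pvDed, if_neg hx]
      rw [show ((u, s).1 ++ [x], PySem.Set.add (u, s).2 x) = (u ++ [x], s ++ [x]) from by
            rw [show PySem.Set.add (u, s).2 x = s ++ [x] from PySem.Set.add_of_not_mem hx]]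
      rw [ih]
      simp

theorem pvDed_congr (l S S' : List String) (h : ∀ x ∈ l, (x ∈ S ↔ x ∈ S')) :
    pvDed S l = pvDed S' l := by
  induction l generalizing S S' with
  | nil => rfl
  | cons x xs ih =>
    have hx := h x (by simp)
    by_cases hxs : x ∈ S
    · simp [pvDed, hxs, hx.mp hxs, ih S S' (fun y hy => h y (List.mem_cons_of_mem _ hy))]
    · have hxs' : x ∉ S' := fun c => hxs (hx.mpr c)
      simp only [pvDed, if_neg hxs, if_neg hxs']
      rw [ih (S ++ [x]) (S' ++ [x]) (fun y hy => by
        simp only [List.mem_append, List.mem_singleton]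
        rw [h y (List.mem_cons_of_mem _ hy)])]

theorem pvDed_not_mem_seen (l S : List String) (x : String) (h : x ∈ pvDed S l) : x ∉ S := by
  induction l generalizing S with
  | nil => simp [pvDed] at h
  | cons a as ih =>
    by_cases ha : a ∈ S
    · exact ih _ (by simpa [pvDed, ha] using h)
    · simp only [pvDed, if_neg ha, List.mem_cons] at h
      rcases h with rfl | h
      · exact ha
      · have := ih _ h
        simp at this
        exact this.1

theorem pvDed_mem_sub (l S : List String) (x : String) (h : x ∈ pvDed S l) : x ∈ l := by
  induction l generalizing S with
  | nil => simp [pvDed] at h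
  | cons a as ih =>
    by_cases ha : a ∈ S
    · simp only [pvDed, if_pos ha] at h
      exact List.mem_cons_of_mem _ (ih _ h)
    · simp only [pvDed, if_neg ha, List.mem_cons] at h
      rcases h with rfl | h
      · simp
      · exact List.mem_cons_of_mem _ (ih _ h)

theorem pvDed_append (a b S : List String) :
    pvDed S (a ++ b) = pvDed S a ++ pvDed (S ++ a) b := by
  induction a generalizing S with
  | nil =>
    simp only [List.nil_append, pvDed, List.append_nil]
  | cons x xs ih =>
    by_cases hx : x ∈ S
    · simp only [List.cons_append, pvDed, if_pos hx, ih]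
      congr 1
      apply pvDed_congr
      intro y _
      simp only [List.mem_append, List.mem_cons]
      constructor
      · rintro (h1 | h1)
        · exact Or.inl h1
        · exact Or.inr (Or.inr h1)
      · rintro (h1 | rfl | h1)
        · exact Or.inl h1
        · exact Or.inl hx
        · exact Or.inr h1
    · simp only [List.cons_append, pvDed, if_neg hx, ih]
      congr 2
      apply pvDed_congr
      intro y _
      simp only [List.mem_append, List.mem_cons]
      tauto

theorem pvDed_filter (l S : List String) (q : String → Bool) :
    pvDed S (l.filter q) = (pvDed S l).filter q := by
  induction l generalizing S with
  | nil => simp [pvDed]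
  | cons a as ih =>
    by_cases hq : q a
    · by_cases ha : a ∈ S
      · rw [List.filter_cons_of_pos hq]
        simp only [pvDed, if_pos ha, ih]
      · rw [List.filter_cons_of_pos hq]
        simp only [pvDed, if_neg ha]
        rw [ih, List.filter_cons_of_pos hq]
    · by_cases ha : a ∈ S
      · rw [List.filter_cons_of_neg hq]
        simp only [pvDed, if_pos ha, ih]
      · rw [List.filter_cons_of_neg hq]
        simp only [pvDed, if_neg ha]
        rw [List.filter_cons_of_neg hq, ← ih]
        apply pvDed_congr
        intro y hy
        have hqy : q y := List.of_mem_filter hy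
        have hne : y ≠ a := by
          rintro rfl
          rw [hqy] at hq
          exact hq rfl
        simp [List.mem_append, hne]

theorem pvDed_split (l S T : List String) (hTS : ∀ x, x ∈ T → x ∈ S) :
    pvDed S l = (pvDed T l).filter (fun x => decide (x ∉ S)) := by
  induction l generalizing S T with
  | nil => simp [pvDed]
  | cons a as ih =>
    by_cases haT : a ∈ T
    · simp only [pvDed, if_pos haT, if_pos (hTS a haT)]
      exact ih S T hTS
    · by_cases haS : a ∈ S
      · simp only [pvDed, if_pos haS, if_neg haT, List.filter_cons]
        simp only [haS, not_true, decide_false, Bool.false_eq_true, if_false]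
        exact ih S (T ++ [a]) (fun x hx =>
          (List.mem_append.mp hx).elim (hTS x)
            (fun h => by simp only [List.mem_singleton] at h; exact h ▸ haS))
      · simp only [pvDed, if_neg haS, if_neg haT, List.filter_cons]
        simp only [haS, not_false_iff, decide_true, if_true]
        congr 1
        rw [ih (S ++ [a]) (T ++ [a]) (fun x hx =>
          List.mem_append.mpr ((List.mem_append.mp hx).elim (fun h => Or.inl (hTS x h)) Or.inr))]
        apply List.filter_congr
        intro y hy
        have hyT : y ∉ T ++ [a] := pvDed_not_mem_seen _ _ _ hy
        have hya : y ≠ a := fun h => hyT (by simp [h])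
        simp [List.mem_append, hya]

theorem pvDed_seen (l S : List String) :
    pvDed S l = (pvDed [] l).filter (fun x => decide (x ∉ S)) :=
  pvDed_split l S [] (by simp)

theorem pvDed_nil_eq_dedup (l : List String) :
    pvDed [] l = PySem.List.dedup l := by
  rw [PySem.List.dedup_eq_ofList]
  induction l with
  | nil => rfl
  | cons x xs ih =>
    rw [PySem.Set.ofList_cons]
    show (if x ∈ ([] : List String) then pvDed [] xs else x :: pvDed ([] ++ [x]) xs) = _
    rw [if_neg (by simp)]
    congr 1
    rw [show ([] ++ [x] : List String) = [x] by simp, pvDed_seen xs [x], ih]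
    rw [show PySem.Set.discard (PySem.Set.ofList xs) x
          = (PySem.Set.ofList xs).filter (fun y => !(y == x)) from rfl]
    apply List.filter_congr
    intro y _
    simp only [List.mem_singleton, decide_not]
    rw [Bool.beq_eq_decide_eq]

-- the key bridge: A's deduped flatMap equals B's pending-pool pass
theorem pvKey (lines kws : List String) (S : List String) :
    pvDed S (lines.flatMap (fun ln => kws.filter (pvC ln)))
      = pvU lines ((pvDed [] kws).filter (fun x => decide (x ∉ S))) := by
  induction lines generalizing S with
  | nil => simp [pvDed, pvU]
  | cons ln ls ih =>
    rw [List.flatMap_cons, pvDed_append, pvDed_filter, pvDed_seen kws S]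
    show _ = pvU (ln :: ls) _
    simp only [pvU]
    congr 1
    rw [ih (S ++ kws.filter (pvC ln))]
    congr 1
    rw [List.filter_filter]
    apply List.filter_congr
    intro y hy
    have hyk : y ∈ kws := pvDed_mem_sub _ _ _ hy
    by_cases hyS : y ∈ S
    · simp [List.mem_append, hyS]
    · by_cases hyc : pvC ln y
      · simp [List.contains_eq_mem, List.mem_filter, List.mem_append, hyS, hyc, hyk, hy]
      · simp [List.contains_eq_mem, List.mem_filter, List.mem_append, hyS, hyc]

-- B's pending fold is pvU
theorem pvB2 (lines : List String) (u p : List String) :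
    (lines.foldl (fun (up : List String × List String) ln =>
        let found := up.2.filter (fun kw => PySem.Str.isIn kw ln)
        (up.1 ++ found, up.2.filter (fun kw => !found.contains kw))) (u, p)).1
      = u ++ pvU lines p := by
  induction lines generalizing u p with
  | nil => simp [pvU]
  | cons ln ls ih =>
    simp only [List.foldl_cons, ih, pvU]
    simp [pvC]

-- the double count swap
theorem pvSwap (lines kws : List String) :
    (lines.map (fun ln => (kws.countP (pvC ln) : Int))).sum
      = (kws.map (fun kw => (lines.countP (fun ln => pvC ln kw) : Int))).sum := by
  induction lines with
  | nil => simp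
  | cons ln ls ih =>
    simp only [List.map_cons, List.sum_cons, ih]
    have hstep : ∀ kw : String, (List.countP (fun l' => pvC l' kw) (ln :: ls) : Int)
        = (if pvC ln kw then (1 : Int) else 0) + (List.countP (fun l' => pvC l' kw) ls : Int) := by
      intro kw
      rw [List.countP_cons]
      by_cases h : pvC ln kw
      · simp [h]
        ring
      · simp [h]
    calc (kws.countP (pvC ln) : Int)
          + (kws.map (fun kw => (ls.countP (fun l' => pvC l' kw) : Int))).sum
        = (kws.map (fun kw => if pvC ln kw then (1:Int) else 0)).sum
          + (kws.map (fun kw => (ls.countP (fun l' => pvC l' kw) : Int))).sum := by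
          rw [PySem.List.sum_map_ite_one_zero]
      _ = (kws.map (fun kw => (if pvC ln kw then (1:Int) else 0)
            + (ls.countP (fun l' => pvC l' kw) : Int))).sum := by
          rw [List.sum_map_add]
      _ = (kws.map (fun kw => (List.countP (fun l' => pvC l' kw) (ln :: ls) : Int))).sum := by
          apply congrArg
          apply List.map_congr_left
          intro kw _
          rw [hstep kw]

-- B's total
theorem pvBtotal (lines kws : List String) (t : Int) :
    kws.foldl (fun t kw =>
        lines.foldl (fun t ln => if PySem.Str.isIn kw ln then t + 1 else t) t) t
      = t + (kws.map (fun kw => (lines.countP (fun ln => pvC ln kw) : Int))).sum := by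
  induction kws generalizing t with
  | nil => simp
  | cons kw kws ih =>
    rw [List.foldl_cons, ih,
        show lines.foldl (fun t ln => if PySem.Str.isIn kw ln then t + 1 else t) t
          = t + (lines.countP (fun ln => pvC ln kw) : Int) from by
          simpa [pvC] using PySem.List.foldl_if_add_one (fun ln => PySem.Str.isIn kw ln) lines t]
    simp only [List.map_cons, List.sum_cons]
    ring

-- ===== VERDICT (by name: the statement is the Claim_ definition above) =====
theorem count_recovery_hits_spec : Claim_equal_count_recovery_hits := by
  intro lines keywords _
  have huniq : pvDed PySem.Set.empty (lines.flatMap (fun ln => keywords.filter (pvC ln)))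
      = pvU lines (PySem.List.dedup keywords) := by
    rw [show (PySem.Set.empty : PySem.Set String) = [] from rfl,
        pvKey lines keywords [], ← pvDed_nil_eq_dedup]
    congr 1
    simp
  simp only [Spec_count_recovery_hits, count_recovery_hits, count_recovery_hits_alt,
    pvA_outer, pvA2, pvB2, pvBtotal, ← pvSwap, List.nil_append, zero_add]
  rw [huniq]
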